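-- pv_equiv track=rewrite | github.com/john-whiting/advent-of-code-2022 | advent_of_code_solutions/Y2022/day12.py | find_points_of_interest
-- ===== SOURCE A (Python) =====
-- def find_points_of_interest(grid: list[list[int]]) -> tuple[tuple[int, int], tuple[int, int], list[tuple[int, int]]]:
--     start = None
--     end = None
--     naught_values = []
--     for row_idx in range(len(grid)):
--         for col_idx in range(len(grid[row_idx])):
--             val = grid[row_idx][col_idx]
--             if val == 0:
--                 naught_values += [(row_idx, col_idx)]
--             if val == -14:
--                 # this is the start ord('S') - 97 = -14
--                 start = (row_idx, col_idx)
--                 naught_values += [start]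
--             if val == -28:
--                 # this is the start ord('E') - 97 = -28
--                 end = (row_idx, col_idx)
--     return start, end, naught_values
-- ===== SOURCE B (Python) =====
-- def find_points_of_interest(grid: list[list[int]]) -> tuple[tuple[int, int], tuple[int, int], list[tuple[int, int]]]:
--     cells = [(r, c, v) for r, row in enumerate(grid) for c, v in enumerate(row)]
--     naught_values = [(r, c) for r, c, v in cells if v == 0 or v == -14]
--     start = next(((r, c) for r, c, v in reversed(cells) if v == -14), None)
--     end = next(((r, c) for r, c, v in reversed(cells) if v == -28), None)
--     return start, end, naught_values
-- ===== Notes on version B (the rewrite author's own statement) =====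
-- stated objective: alternative
-- what changed: A's single fused nested index-loop with three mutable accumulators is replaced by building a flattened (row, col, value) cell list once, then computing naught_values as one filter comprehension and start/end as the first hit over the reversed cell list (equal to A's last-overwrite).
import Mathlib
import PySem

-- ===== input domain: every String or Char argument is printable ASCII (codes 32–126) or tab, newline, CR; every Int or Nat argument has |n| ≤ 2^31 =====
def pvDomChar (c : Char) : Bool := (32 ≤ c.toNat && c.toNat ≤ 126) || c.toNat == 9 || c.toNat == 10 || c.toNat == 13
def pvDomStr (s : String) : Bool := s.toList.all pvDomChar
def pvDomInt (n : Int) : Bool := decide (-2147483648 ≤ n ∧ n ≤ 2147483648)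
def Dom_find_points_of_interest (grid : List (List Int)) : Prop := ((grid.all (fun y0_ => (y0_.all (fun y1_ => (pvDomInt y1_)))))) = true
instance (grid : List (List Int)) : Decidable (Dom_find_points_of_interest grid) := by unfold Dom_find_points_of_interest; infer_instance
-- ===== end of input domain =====

-- B replaces A's fused index-loop scan with a flattened cell list: naughts by one filter
-- comprehension, start/end by first hit over the REVERSED cells (= A's last overwrite);
-- objective: alternative decomposition, same O(n) cost.

-- ===== PORT A =====
-- literal transliteration of A: nested index loops over ranges, one mutable state (start, end, naughts)
def find_points_of_interest (grid : List (List Int)) : (Option (Int × Int)) × (Option (Int × Int)) × (List (Int × Int)) :=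
  (PySem.List.pyRange 0 grid.length 1).foldl (fun st row_idx =>
    let row := PySem.List.pyGetD grid row_idx []
    (PySem.List.pyRange 0 row.length 1).foldl (fun st col_idx =>
      let val := PySem.List.pyGetD row col_idx 0
      let st := if val == 0 then (st.1, st.2.1, st.2.2 ++ [(row_idx, col_idx)]) else st
      let st := if val == -14 then (some (row_idx, col_idx), st.2.1, st.2.2 ++ [(row_idx, col_idx)]) else st
      let st := if val == -28 then (st.1, some (row_idx, col_idx), st.2.2) else st
      st) st)
    ((none, none, []) : (Option (Int × Int)) × (Option (Int × Int)) × (List (Int × Int)))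

-- ===== PORT B =====
-- Source B's cells comprehension: [(r, c, v) for r, row in enumerate(grid) for c, v in enumerate(row)]
def pvCells (grid : List (List Int)) : List (Int × Int × Int) :=
  (PySem.List.enumerate grid).flatMap (fun rc => (PySem.List.enumerate rc.2).map (fun cv => (rc.1, cv.1, cv.2)))

def find_points_of_interest_alt (grid : List (List Int)) : (Option (Int × Int)) × (Option (Int × Int)) × (List (Int × Int)) :=
  let cells := pvCells grid
  let naught_values := (cells.filter (fun t => t.2.2 == 0 || t.2.2 == -14)).map (fun t => (t.1, t.2.1))
  let start := (cells.reverse.find? (fun t => t.2.2 == -14)).map (fun t => (t.1, t.2.1))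
  let end_ := (cells.reverse.find? (fun t => t.2.2 == -28)).map (fun t => (t.1, t.2.1))
  (start, end_, naught_values)

-- ===== PRECONDITION & SPEC =====
def Spec_find_points_of_interest (grid : List (List Int)) (out : (Option (Int × Int)) × (Option (Int × Int)) × (List (Int × Int))) : Prop := out = find_points_of_interest_alt grid
instance (grid : List (List Int)) (out : (Option (Int × Int)) × (Option (Int × Int)) × (List (Int × Int))) : Decidable (Spec_find_points_of_interest grid out) := by unfold Spec_find_points_of_interest; infer_instance

-- ===== CLAIM (what is proved, stated in full; the proofs are below) =====
def Claim_equal_find_points_of_interest : Prop := ∀ (grid : List (List Int)), Dom_find_points_of_interest grid → Spec_find_points_of_interest grid (find_points_of_interest grid)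

-- ===== LEMMAS AND PROOFS =====

-- A's loop body, as a step over one (row_idx, col_idx, val) cell
def pvStep (st : (Option (Int × Int)) × (Option (Int × Int)) × (List (Int × Int)))
    (c : Int × Int × Int) : (Option (Int × Int)) × (Option (Int × Int)) × (List (Int × Int)) :=
  let st := if c.2.2 == 0 then (st.1, st.2.1, st.2.2 ++ [(c.1, c.2.1)]) else st
  let st := if c.2.2 == -14 then (some (c.1, c.2.1), st.2.1, st.2.2 ++ [(c.1, c.2.1)]) else st
  let st := if c.2.2 == -28 then (st.1, some (c.1, c.2.1), st.2.2) else st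
  st

-- A's nested range fold = one fold of pvStep over the flattened enumerated cells
theorem pvA_eq_cells (grid : List (List Int)) :
    find_points_of_interest grid = (pvCells grid).foldl pvStep (none, none, []) := by
  unfold find_points_of_interest pvCells
  rw [PySem.List.enumerate_eq_map_pyRange grid []]
  rw [List.foldl_flatMap, List.foldl_map]
  congr 1
  funext st p
  dsimp only
  rw [PySem.List.enumerate_eq_map_pyRange (PySem.List.pyGetD grid p []) 0,
    List.foldl_map, List.foldl_map]
  rfl

-- one fold of pvStep, characterised: last -14 hit, last -28 hit, filtered naughts appended
theorem pvFold_char (l : List (Int × Int × Int))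
    (a b : Option (Int × Int)) (ns : List (Int × Int)) :
    l.foldl pvStep (a, b, ns) =
      (((l.reverse.find? (fun t => t.2.2 == -14)).map (fun t => (t.1, t.2.1))).or a,
       ((l.reverse.find? (fun t => t.2.2 == -28)).map (fun t => (t.1, t.2.1))).or b,
       ns ++ (l.filter (fun t => t.2.2 == 0 || t.2.2 == -14)).map (fun t => (t.1, t.2.1))) := by
  induction l generalizing a b ns with
  | nil => simp
  | cons c t ih =>
    obtain ⟨ri, ci, v⟩ := c
    simp only [List.foldl_cons, List.reverse_cons, List.find?_append, List.filter_cons]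
    by_cases h0 : v = 0 <;> by_cases h14 : v = (-14 : Int) <;> by_cases h28 : v = (-28 : Int) <;>
      simp_all [pvStep, ih, Option.or_assoc] <;>
      cases List.find? (fun t => t.2.2 == (-14 : Int)) t.reverse <;>
      cases List.find? (fun t => t.2.2 == (-28 : Int)) t.reverse <;> simp

theorem pvSpec (grid : List (List Int)) :
    find_points_of_interest grid = find_points_of_interest_alt grid := by
  rw [pvA_eq_cells, pvFold_char]
  simp [find_points_of_interest_alt]

-- ===== VERDICT (by name: the statement is the Claim_ definition above) =====
theorem find_points_of_interest_spec : Claim_equal_find_points_of_interest := by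
  intro grid _
  exact pvSpec grid
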